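-- pv_equiv track=rewrite | github.com/zachafranz/pythonLib | hw8pr1.py | innerCells
-- ===== SOURCE A (Python) =====
-- def createOneRow(width):
--     """ Returns one row of zeros of width 'width'."""
--     row = []
--     for col in range(width):
--         row += [0]
--     return row
--
-- def createBoard(width, height):
--     """ Returns one array of zeros of width 'width' and height 'height'."""
--     board = []
--     for i in range(height):
--         board = board+[createOneRow(width)]
--     return board
--
-- def innerCells(width, height):
--     """ Returns an array with 'width' columns and 'height' rows with all the border elements equal to 0 and the non-border elements equal to 1.
--     >>> board = innerCells(5, 5)
--     >>> printBoard(board)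
--     00000
--     01110
--     01110
--     01110
--     00000
--     """
--     board = createBoard(width, height)
--
--     for row in range(height):
--         for col in range(width):
--             if (row != 0 and row != height-1) and (col != 0 and col != width-1):
--                 board[row][col] = 1
--             else:
--                 board[row][col] = 0
--     return board
-- ===== SOURCE B (Python) =====
-- def innerCells(width, height):
--     """Row-pattern construction: classify each row as border or interior and
--     emit it wholesale, instead of zero-filling a board and rewriting each cell."""
--     def _row(r):
--         if r == 0 or r == height - 1 or width < 2:
--             return [0] * width
--         return [0] + [1] * (width - 2) + [0]
--     return [_row(r) for r in range(height)]
-- ===== Notes on version B (the rewrite author's own statement) =====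
-- stated objective: alternative
-- what changed: B classifies each row (border/interior) and emits the whole row pattern [0]*w or [0]+[1]*(w-2)+[0] directly, instead of A's building a zero board and then rewriting every cell with a per-cell conditional.
import Mathlib
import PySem

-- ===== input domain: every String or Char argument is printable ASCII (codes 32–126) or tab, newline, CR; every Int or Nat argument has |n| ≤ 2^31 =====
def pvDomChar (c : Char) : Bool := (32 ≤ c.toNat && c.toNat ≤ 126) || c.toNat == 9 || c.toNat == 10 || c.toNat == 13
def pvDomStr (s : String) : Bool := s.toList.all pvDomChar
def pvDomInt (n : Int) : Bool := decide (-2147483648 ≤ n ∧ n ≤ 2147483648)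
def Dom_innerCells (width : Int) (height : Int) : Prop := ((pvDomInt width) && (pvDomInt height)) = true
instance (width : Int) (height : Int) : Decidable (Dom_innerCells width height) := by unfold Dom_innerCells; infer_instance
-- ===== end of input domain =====

-- B changes the decomposition: classify each row and emit its whole pattern, instead of
-- zero-filling a board and rewriting every cell (objective: alternative, same cost).

-- ===== PORT A =====
def createOneRow (width : Int) : List Int :=
  (PySem.List.pyRange 0 width 1).foldl (fun row _ => row ++ [0]) []

def createBoard (width : Int) (height : Int) : List (List Int) :=
  (PySem.List.pyRange 0 height 1).foldl (fun board _ => board ++ [createOneRow width]) []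

-- board[row][col] = v: the indices produced by the loops are always in range, so
-- pyGetD/pySetD are exact here (they never hit their default / clamp branch).
def innerCells (width : Int) (height : Int) : List (List Int) :=
  (PySem.List.pyRange 0 height 1).foldl
    (fun board row =>
      (PySem.List.pyRange 0 width 1).foldl
        (fun b col =>
          PySem.List.pySetD b row
            (PySem.List.pySetD (PySem.List.pyGetD b row []) col
              (if (row ≠ 0 ∧ row ≠ height - 1) ∧ (col ≠ 0 ∧ col ≠ width - 1) then 1 else 0)))
        board)
    (createBoard width height)

-- ===== PORT B =====
def pvAltRow (width : Int) (height : Int) (r : Int) : List Int :=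
  if r = 0 ∨ r = height - 1 ∨ width < 2 then List.replicate width.toNat 0
  else [0] ++ List.replicate (width - 2).toNat 1 ++ [0]

def innerCells_alt (width : Int) (height : Int) : List (List Int) :=
  (PySem.List.pyRange 0 height 1).map (pvAltRow width height)

-- ===== PRECONDITION & SPEC =====
def Spec_innerCells (width : Int) (height : Int) (out : List (List Int)) : Prop := out = innerCells_alt width height
instance (width : Int) (height : Int) (out : List (List Int)) : Decidable (Spec_innerCells width height out) := by unfold Spec_innerCells; infer_instance

-- ===== CLAIM (what is proved, stated in full; the proofs are below) =====
def Claim_equal_innerCells : Prop := ∀ (width : Int) (height : Int), Dom_innerCells width height → Spec_innerCells width height (innerCells width height)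

-- ===== LEMMAS AND PROOFS =====

-- the cell value A writes, as a function of Nat indices
def pvCell (width : Int) (height : Int) (row col : Nat) : Int :=
  if ((row : Int) ≠ 0 ∧ (row : Int) ≠ height - 1) ∧ ((col : Int) ≠ 0 ∧ (col : Int) ≠ width - 1)
  then 1 else 0

theorem pv_createOneRow_aux (l : List Int) (acc : List Int) :
    l.foldl (fun row _ => row ++ [0]) acc = acc ++ List.replicate l.length 0 := by
  induction l generalizing acc with
  | nil => simp
  | cons x xs ih =>
    simp only [List.foldl_cons, List.length_cons]
    rw [ih, List.append_assoc]
    simp [List.replicate_succ]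

theorem pv_createOneRow (width : Int) :
    createOneRow width = List.replicate width.toNat 0 := by
  unfold createOneRow
  rw [pv_createOneRow_aux]
  simp [PySem.List.length_pyRange_one]

theorem pv_createBoard_aux (l : List Int) (acc : List (List Int)) (r : List Int) :
    l.foldl (fun board _ => board ++ [r]) acc = acc ++ List.replicate l.length r := by
  induction l generalizing acc with
  | nil => simp
  | cons x xs ih =>
    simp only [List.foldl_cons, List.length_cons]
    rw [ih, List.append_assoc]
    simp [List.replicate_succ]

theorem pv_createBoard (width : Int) (height : Int) :
    createBoard width height
      = List.replicate height.toNat (List.replicate width.toNat 0) := by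
  unfold createBoard
  rw [pv_createBoard_aux, pv_createOneRow]
  simp [PySem.List.length_pyRange_one]

-- filling positions 0..n-1 of a row of length ≥ n
theorem pv_rowfill (g : Nat → Int) :
    ∀ (n : Nat) (r : List Int), n ≤ r.length →
    (List.range n).foldl (fun r c => r.set c (g c)) r
      = (List.range n).map g ++ r.drop n := by
  intro n
  induction n with
  | zero => simp
  | succ n ih =>
    intro r hr
    rw [List.range_succ, List.foldl_append, List.map_append]
    rw [ih r (by omega)]
    have hlen : n < r.length := by omega
    have hdrop : r.drop n = r[n] :: r.drop (n + 1) := by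
      rw [List.drop_eq_getElem_cons hlen]
    simp only [List.foldl_cons, List.foldl_nil, List.map_cons, List.map_nil]
    rw [List.set_append_right _ _ (by simp), List.length_map, List.length_range, Nat.sub_self]
    rw [hdrop, List.set_cons_zero]
    simp [List.append_assoc]

-- one outer iteration rewrites exactly row `row`
theorem pv_iter (g : Nat → Int) (row : Nat) :
    ∀ (n : Nat) (b : List (List Int)), row < b.length →
    (List.range n).foldl
        (fun b c => b.set row ((b.getD row []).set c (g c))) b
      = b.set row ((List.range n).foldl (fun r c => r.set c (g c)) (b.getD row [])) := by
  intro n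
  induction n with
  | zero =>
    intro b hb
    simp only [List.range_zero, List.foldl_nil]
    rw [List.getD_eq_getElem?_getD, List.getElem?_eq_getElem hb]
    exact (List.set_getElem_self hb).symm
  | succ n ih =>
    intro b hb
    rw [List.range_succ, List.foldl_append, List.foldl_append]
    rw [ih b hb]
    simp only [List.foldl_cons, List.foldl_nil]
    have hset : (b.set row ((List.range n).foldl (fun r c => r.set c (g c)) (b.getD row []))).getD row []
        = (List.range n).foldl (fun r c => r.set c (g c)) (b.getD row []) := by
      rw [List.getD_eq_getElem?_getD, List.getElem?_set_self (by simpa using hb)]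
      rfl
    rw [hset, List.set_set]

def pvRowOut (width : Int) (height : Int) (row : Nat) : List Int :=
  (List.range width.toNat).map (pvCell width height row)

-- the outer loop, in Nat-indexed form
theorem pv_outer (width height : Int) :
    ∀ (n : Nat) (b : List (List Int)), n ≤ b.length →
    (∀ r ∈ b, r.length = width.toNat) →
    (List.range n).foldl
        (fun board row =>
          (List.range width.toNat).foldl
            (fun bb c => bb.set row ((bb.getD row []).set c (pvCell width height row c))) board)
        b
      = (List.range n).map (pvRowOut width height) ++ b.drop n := by
  intro n
  induction n with
  | zero => simp
  | succ n ih =>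
    intro b hb hrows
    rw [List.range_succ, List.foldl_append, List.map_append]
    rw [ih b (by omega) hrows]
    simp only [List.foldl_cons, List.foldl_nil, List.map_cons, List.map_nil]
    have hlen : ((List.range n).map (pvRowOut width height) ++ b.drop n).length = b.length := by
      simp; omega
    have hrowlt : n < ((List.range n).map (pvRowOut width height) ++ b.drop n).length := by
      rw [hlen]; omega
    rw [pv_iter (pvCell width height n) n width.toNat _ hrowlt]
    have hbn : n < b.length := by omega
    have hget : ((List.range n).map (pvRowOut width height) ++ b.drop n).getD n [] = b[n] := by
      rw [List.getD_eq_getElem?_getD, List.getElem?_append_right (by simp)]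
      simp [hbn]
    rw [hget]
    have hlenbn : b[n].length = width.toNat := hrows _ (List.getElem_mem hbn)
    rw [pv_rowfill _ _ _ (le_of_eq hlenbn.symm)]
    have hnil : b[n].drop width.toNat = [] := List.drop_eq_nil_of_le (by omega)
    rw [hnil, List.append_nil]
    have hdrop : b.drop n = b[n] :: b.drop (n + 1) := List.drop_eq_getElem_cons hbn
    rw [hdrop, List.set_append_right _ _ (by simp), List.length_map, List.length_range,
        Nat.sub_self, List.set_cons_zero]
    simp [pvRowOut, List.append_assoc]

-- A in closed form
theorem pv_A_closed (width height : Int) :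
    innerCells width height
      = (List.range height.toNat).map (pvRowOut width height) := by
  unfold innerCells
  rw [pv_createBoard]
  rw [PySem.List.pyRange_one 0 height, PySem.List.pyRange_one 0 width]
  simp only [Int.sub_zero, List.foldl_map, zero_add]
  have hbody :
      (List.range height.toNat).foldl
        (fun (board : List (List Int)) (row : Nat) =>
          (List.range width.toNat).foldl
            (fun b (col : Nat) =>
              PySem.List.pySetD b (row : Int)
                (PySem.List.pySetD (PySem.List.pyGetD b (row : Int) []) (col : Int)
                  (if ((row : Int) ≠ 0 ∧ (row : Int) ≠ height - 1) ∧
                      ((col : Int) ≠ 0 ∧ (col : Int) ≠ width - 1) then 1 else 0)))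
            board)
        (List.replicate height.toNat (List.replicate width.toNat 0))
      = (List.range height.toNat).foldl
        (fun board row =>
          (List.range width.toNat).foldl
            (fun bb c => bb.set row ((bb.getD row []).set c (pvCell width height row c))) board)
        (List.replicate height.toNat (List.replicate width.toNat 0)) := by
    simp [PySem.List.pySetD_natCast, pvCell]
  rw [hbody]
  rw [pv_outer width height height.toNat _ (by simp)
      (by intro r hr; rw [List.eq_of_mem_replicate hr]; simp)]
  · simp

-- each B row equals the corresponding A row
theorem pv_row_eq (width height : Int) (r : Nat) :
    pvAltRow width height (r : Int) = pvRowOut width height r := by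
  unfold pvAltRow pvRowOut
  by_cases hb : (r : Int) = 0 ∨ (r : Int) = height - 1 ∨ width < 2
  · rw [if_pos hb]
    have hz : ∀ c ∈ List.range width.toNat, pvCell width height r c = 0 := by
      intro c hc
      simp only [List.mem_range] at hc
      unfold pvCell
      rcases hb with h0 | h1 | hw
      · simp [h0]
      · simp [h1]
      · have : c = 0 := by omega
        simp [this]
    rw [List.map_congr_left hz]
    simp [List.map_const']
  · rw [if_neg hb]
    push Not at hb
    obtain ⟨h0, h1, hw⟩ := hb
    have hrn : r ≠ 0 := fun h => h0 (by simp [h])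
    have hm : 2 ≤ width.toNat := by omega
    apply List.ext_getElem?
    intro i
    cases i with
    | zero =>
      have hc0 : pvCell width height r 0 = 0 := by unfold pvCell; simp
      have hw0 : 0 < width.toNat := by omega
      simp [hc0, hw0]
    | succ j =>
      have hget : ∀ (hj : j + 1 < width.toNat),
          ((List.range width.toNat).map (pvCell width height r))[j + 1]? = some (pvCell width height r (j + 1)) := by
        intro hj
        simp [hj]
      rcases Nat.lt_or_ge (j + 1) width.toNat with hj | hj
      · rw [hget hj]
        have hcell : pvCell width height r (j + 1)
            = if ((j + 1 : Nat) : Int) = width - 1 then 0 else 1 := by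
          unfold pvCell
          split_ifs <;> omega
        rw [hcell]
        simp only [List.singleton_append]
        rcases Nat.lt_or_ge j ((width - 2).toNat) with hj2 | hj2
        · have hne : ((j + 1 : Nat) : Int) ≠ width - 1 := by omega
          rw [if_neg hne, List.getElem?_append_left (by simp [hj2])]
          simp [hj2]
        · have hje : j = (width - 2).toNat := by omega
          have heq : ((j + 1 : Nat) : Int) = width - 1 := by omega
          rw [if_pos heq]
          subst hje
          rw [List.getElem?_append_right (by simp)]
          simp
      · have hnone : ((List.range width.toNat).map (pvCell width height r))[j + 1]? = none := by
          simp; omega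
        rw [hnone]
        simp only [List.singleton_append]
        rw [List.getElem?_eq_none_iff]
        simp; omega

-- ===== VERDICT (by name: the statement is the Claim_ definition above) =====
theorem innerCells_spec : Claim_equal_innerCells := by
  intro width height _
  unfold Spec_innerCells innerCells_alt
  rw [pv_A_closed]
  rw [PySem.List.pyRange_one 0 height]
  simp only [Int.sub_zero, List.map_map]
  apply List.map_congr_left
  intro r hr
  simpa using (pv_row_eq width height r).symm
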